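-- pv_equiv track=rewrite | github.com/PEDSnet/pedsnetdcc | pedsnetdcc/utils.py | _make_conn_str
-- ===== SOURCE A (Python) =====
-- def _conn_str_sort_key(key):
--     """Provide pseudo-consistent ordering of components of a connection string.
--
--     This is of no value except to aid in debugging.
--
--     :param key: key
--     :return: numeric `key` value usable by e.g. `sorted`
--     """
--     if key == 'host':
--         return ' 1'
--     if key == 'port':
--         return ' 2'
--     if key == 'dbname':
--         return ' 3'
--     if key == 'user':
--         return ' 4'
--     if key == 'password':
--         return ' 5'
--     return key.lower()
--
-- def _make_conn_str(parts):
--     """Stitch a conn str together from a dictionary"""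
--     pairs = []
--     for parts_key in sorted(parts.keys(), key=_conn_str_sort_key):
--         parts_value = parts[parts_key]
--         if ' ' in parts_value:
--             parts_value = "'{0}'".format(parts_value)
--         pairs.append('{0}={1}'.format(parts_key, parts_value))
--     return ' '.join(pairs)
-- ===== SOURCE B (Python) =====
-- _PRIORITY = ('host', 'port', 'dbname', 'user', 'password')
--
--
-- def _fmt(key, value):
--     """Render one key=value component, quoting a value that contains a space."""
--     if ' ' in value:
--         value = "'{0}'".format(value)
--     return '{0}={1}'.format(key, value)
--
--
-- def _make_conn_str(parts):
--     """Stitch a conn str together from a dictionary: the well-known connection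
--     fields first in a fixed order, then the remaining keys sorted
--     case-insensitively."""
--     order = [k for k in _PRIORITY if k in parts]
--     order += sorted((k for k in parts if k not in _PRIORITY), key=str.lower)
--     return ' '.join(_fmt(k, parts[k]) for k in order)
-- ===== Notes on version B (the rewrite author's own statement) =====
-- stated objective: simpler
-- what changed: Replaces the space-prefixed sort-key hack (one sorted() over all keys with a custom comparator mapping the five well-known fields to ' 1'..' 5') by an explicit two-phase order: emit the priority fields present in the dict in a fixed literal order, then the remaining keys stably sorted by str.lower, with per-item formatting factored into a helper and a join over a comprehension instead of an append loop.
-- outside the precondition, e.g. on _make_conn_str({'\tx': '1', 'host': 'h'}): A returns '\tx=1 host=h', B returns 'host=h \tx=1'; on _make_conn_str({' 3a': 'v', 'user': 'u'}): A returns ' 3a=v user=u', B returns 'user=u  3a=v'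
import Mathlib
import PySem

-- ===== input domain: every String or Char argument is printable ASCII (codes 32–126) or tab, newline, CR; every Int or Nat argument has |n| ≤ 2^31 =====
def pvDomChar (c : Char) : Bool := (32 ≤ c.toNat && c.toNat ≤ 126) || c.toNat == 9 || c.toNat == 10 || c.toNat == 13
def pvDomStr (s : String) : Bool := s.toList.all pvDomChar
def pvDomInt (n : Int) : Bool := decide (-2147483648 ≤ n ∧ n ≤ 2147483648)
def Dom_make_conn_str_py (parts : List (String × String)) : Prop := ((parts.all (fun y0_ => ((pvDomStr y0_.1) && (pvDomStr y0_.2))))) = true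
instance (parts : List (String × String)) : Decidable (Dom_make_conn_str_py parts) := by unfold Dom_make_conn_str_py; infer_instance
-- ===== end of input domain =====

-- B replaces A's space-prefixed sort-key hack (one sorted() with a custom comparator) by an
-- explicit two-phase order (priority fields in a fixed list, then the rest sorted by lower);
-- objective: simpler.

-- dict lookup parts[k] (first match; keys drawn from the dict, so never missing)
def pvLookup (parts : List (String × String)) (k : String) : String :=
  (((parts.find? (fun kv => kv.1 == k)).map Prod.snd).getD "")

-- ===== PORT A =====
-- _conn_str_sort_key
def connSortKey (key : String) : String :=
  if key = "host" then " 1"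
  else if key = "port" then " 2"
  else if key = "dbname" then " 3"
  else if key = "user" then " 4"
  else if key = "password" then " 5"
  else PySem.Str.lower key

def make_conn_str_py (parts : List (String × String)) : String :=
  let pairs :=
    (PySem.List.sorted (parts.map Prod.fst) connSortKey false).foldl
      (fun acc parts_key =>
        let parts_value := pvLookup parts parts_key
        let parts_value := if PySem.Str.isIn " " parts_value
                             then "'" ++ parts_value ++ "'" else parts_value
        acc ++ [parts_key ++ "=" ++ parts_value]) []
  PySem.Str.join " " pairs

-- ===== PORT B =====
def pvPrio : List String := ["host", "port", "dbname", "user", "password"]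

-- _fmt
def pvFmtB (key value : String) : String :=
  let value := if PySem.Str.isIn " " value then "'" ++ value ++ "'" else value
  key ++ "=" ++ value

def make_conn_str_py_alt (parts : List (String × String)) : String :=
  let keys := parts.map Prod.fst
  let order := pvPrio.filter (fun k => keys.contains k) ++
    PySem.List.sorted (keys.filter (fun k => !(pvPrio.contains k)))
      (fun k => PySem.Str.lower k) false
  PySem.Str.join " " (order.map (fun k => pvFmtB k (pvLookup parts k)))

-- the pseudo sort key A assigns to each of the five priority fields
def pvRank (p : String) : String :=
  if p = "host" then " 1" else if p = "port" then " 2" else if p = "dbname" then " 3"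
  else if p = "user" then " 4" else " 5"

-- ===== PRECONDITION & SPEC =====
-- Pre_ asks (i) pairwise-distinct keys — every real dict has them, a duplicate-key list
-- encodes no Python dict — and (ii) that each non-priority key lower()s to a string sorting
-- strictly after the pseudo keys ' 1'..' 5' of the priority fields actually present: outside
-- that, A's space-prefix sort-key hack interleaves (or ties) such a key (one that is empty or
-- starts with a control character or ' ') with the priority block, a corner order nobody specified.
def Pre_make_conn_str_py (parts : List (String × String)) : Prop :=
  (parts.map Prod.fst).Nodup ∧
    ∀ k ∈ parts.map Prod.fst, k ∉ pvPrio →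
      ∀ p ∈ pvPrio, p ∈ parts.map Prod.fst →
        (pvRank p).toList < (PySem.Str.lower k).toList
instance (parts : List (String × String)) : Decidable (Pre_make_conn_str_py parts) := by
  unfold Pre_make_conn_str_py; infer_instance

def pvWitness_make_conn_str_py : (List (String × String)) :=
  [("host", "localhost"), ("extra", "a b")]

def Spec_make_conn_str_py (parts : List (String × String)) (out : String) : Prop := out = make_conn_str_py_alt parts
instance (parts : List (String × String)) (out : String) : Decidable (Spec_make_conn_str_py parts out) := by unfold Spec_make_conn_str_py; infer_instance

-- ===== CLAIM (what is proved, stated in full; the proofs are below) =====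
def Claim_equal_make_conn_str_py : Prop := ∀ (parts : List (String × String)), Dom_make_conn_str_py parts → Pre_make_conn_str_py parts → Spec_make_conn_str_py parts (make_conn_str_py parts)

-- ===== LEMMAS AND PROOFS =====

-- x sorts before everything in L2: the insertion happens inside the left block
theorem pv_insertBy_append_before {α : Type} (before : α → α → Bool) (x : α)
    (L1 L2 : List α) (h : ∀ y ∈ L2, before x y = true) :
    PySem.List.insertBy before x (L1 ++ L2) =
      PySem.List.insertBy before x L1 ++ L2 := by
  induction L1 with
  | nil =>
    cases L2 with
    | nil => rfl
    | cons y ys => simp [PySem.List.insertBy, h y (by simp)]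
  | cons a L1 ih =>
    by_cases hb : before x a = true
    · simp [PySem.List.insertBy, hb]
    · simp [PySem.List.insertBy, hb, ih]

-- x sorts after everything in L1: the insertion happens inside the right block
theorem pv_insertBy_append_after {α : Type} (before : α → α → Bool) (x : α)
    (L1 L2 : List α) (h : ∀ y ∈ L1, before x y = false) :
    PySem.List.insertBy before x (L1 ++ L2) =
      L1 ++ PySem.List.insertBy before x L2 := by
  induction L1 with
  | nil => rfl
  | cons a L1 ih =>
    have ha : before x a = false := h a (by simp)
    simp [PySem.List.insertBy, ha]
    exact ih (fun y hy => h y (by simp [hy]))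

theorem pv_insertBy_congr {α : Type} (bef1 bef2 : α → α → Bool) (x : α) (L : List α)
    (h : ∀ y ∈ L, bef1 x y = bef2 x y) :
    PySem.List.insertBy bef1 x L = PySem.List.insertBy bef2 x L := by
  induction L with
  | nil => rfl
  | cons a L ih =>
    have ha : bef1 x a = bef2 x a := h a (by simp)
    by_cases hb : bef2 x a = true
    · simp [PySem.List.insertBy, hb, ha ▸ hb]
    · simp [PySem.List.insertBy, hb, ha]
      exact ih (fun y hy => h y (by simp [hy]))

-- a stable sort splits at a strict boundary between the p-block and the ¬p-block
theorem pv_sorted_split {α κ : Type} [LinearOrder κ] (xs : List α) (key : α → κ)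
    (p : α → Bool)
    (h : ∀ a ∈ xs, ∀ b ∈ xs, p a = true → p b = false → key a < key b) :
    PySem.List.sorted xs key =
      PySem.List.sorted (xs.filter p) key ++
        PySem.List.sorted (xs.filter (fun a => !p a)) key := by
  induction xs using List.reverseRecOn with
  | nil => rfl
  | append_singleton xs x ih =>
    have hxs : ∀ a ∈ xs, ∀ b ∈ xs, p a = true → p b = false → key a < key b :=
      fun a ha b hb => h a (by simp [ha]) b (by simp [hb])
    rw [PySem.List.sorted_eq_foldl_insertBy, List.foldl_append,
      ← PySem.List.sorted_eq_foldl_insertBy, ih hxs]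
    simp only [List.foldl_cons, List.foldl_nil, List.filter_append, List.filter_cons,
      List.filter_nil]
    by_cases hp : p x = true
    · have hL2 : ∀ y ∈ PySem.List.sorted (xs.filter (fun a => !p a)) key,
          (fun a b => decide (key a < key b)) x y = true := by
        intro y hy
        rw [PySem.List.mem_sorted] at hy
        rw [List.mem_filter] at hy
        have := h x (by simp) y (by simp [hy.1]) hp (by simpa using hy.2)
        simpa using this
      rw [pv_insertBy_append_before _ _ _ _ hL2]
      simp [hp, PySem.List.sorted_eq_foldl_insertBy, List.foldl_append]
    · have hL1 : ∀ y ∈ PySem.List.sorted (xs.filter p) key,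
          (fun a b => decide (key a < key b)) x y = false := by
        intro y hy
        rw [PySem.List.mem_sorted] at hy
        rw [List.mem_filter] at hy
        have := h y (by simp [hy.1]) x (by simp) hy.2 (by simpa using hp)
        simpa using not_lt_of_gt this
      rw [pv_insertBy_append_after _ _ _ _ hL1]
      simp [hp, PySem.List.sorted_eq_foldl_insertBy, List.foldl_append]

-- key functions agreeing on the list give the same (stable) sort
theorem pv_sorted_congr {α κ : Type} [LinearOrder κ] (xs : List α) (k1 k2 : α → κ)
    (h : ∀ a ∈ xs, k1 a = k2 a) :
    PySem.List.sorted xs k1 = PySem.List.sorted xs k2 := by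
  induction xs using List.reverseRecOn with
  | nil => rfl
  | append_singleton xs x ih =>
    rw [PySem.List.sorted_eq_foldl_insertBy, PySem.List.sorted_eq_foldl_insertBy,
      List.foldl_append, List.foldl_append,
      ← PySem.List.sorted_eq_foldl_insertBy, ← PySem.List.sorted_eq_foldl_insertBy,
      ih (fun a ha => h a (by simp [ha]))]
    simp only [List.foldl_cons, List.foldl_nil]
    apply pv_insertBy_congr
    intro y hy
    rw [PySem.List.mem_sorted] at hy
    rw [h x (by simp), h y (by simp [hy])]

theorem pv_sortKey_eq_rank {k : String} (h : k ∈ pvPrio) : connSortKey k = pvRank k := by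
  simp [pvPrio] at h
  rcases h with h | h | h | h | h <;> subst h <;> rfl

theorem pv_sortKey_of_not_prio {k : String} (h : k ∉ pvPrio) :
    connSortKey k = PySem.Str.lower k := by
  simp [pvPrio] at h
  obtain ⟨h1, h2, h3, h4, h5⟩ := h
  simp [connSortKey, h1, h2, h3, h4, h5]

-- the sorted priority block is the priority list filtered to the present keys
theorem pv_prio_block (keys : List String) (hnd : keys.Nodup) :
    PySem.List.sorted (keys.filter (fun k => pvPrio.contains k)) connSortKey =
      pvPrio.filter (fun k => keys.contains k) := by
  apply PySem.List.sorted_eq_of_perm_of_pairwise_lt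
  · rw [List.perm_ext_iff_of_nodup (List.Nodup.filter _ (by decide)) (hnd.filter _)]
    intro a
    simp [List.mem_filter, and_comm]
  · have hp : pvPrio.Pairwise (fun a b => (connSortKey a).toList < (connSortKey b).toList) := by
      decide
    have hp' : pvPrio.Pairwise (fun a b => connSortKey a < connSortKey b) :=
      hp.imp (fun hab => String.lt_iff_toList_lt.mpr hab)
    exact hp'.sublist List.filter_sublist

-- key order: A's single sort equals B's two-phase order
theorem pv_order (parts : List (String × String)) (h : Pre_make_conn_str_py parts) :
    PySem.List.sorted (parts.map Prod.fst) connSortKey =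
      pvPrio.filter (fun k => (parts.map Prod.fst).contains k) ++
        PySem.List.sorted ((parts.map Prod.fst).filter (fun k => !(pvPrio.contains k)))
          (fun k => PySem.Str.lower k) := by
  obtain ⟨hnd, hlow⟩ := h
  rw [pv_sorted_split (parts.map Prod.fst) connSortKey (fun k => pvPrio.contains k)]
  · rw [pv_prio_block _ hnd]
    congr 1
    apply pv_sorted_congr
    intro a ha
    rw [List.mem_filter] at ha
    exact pv_sortKey_of_not_prio (by simpa using ha.2)
  · intro a ha b hb hpa hpb
    have hap : a ∈ pvPrio := by simpa using hpa
    have hbn : b ∉ pvPrio := by simpa using hpb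
    have h2 : (pvRank a).toList < (PySem.Str.lower b).toList :=
      hlow b hb hbn a hap ha
    rw [pv_sortKey_eq_rank hap, pv_sortKey_of_not_prio hbn]
    exact String.lt_iff_toList_lt.mpr h2

-- the shared per-item rendering
def pvItem (parts : List (String × String)) (k : String) : String :=
  let v := pvLookup parts k
  let v := if PySem.Str.isIn " " v then "'" ++ v ++ "'" else v
  k ++ "=" ++ v

-- ===== VERDICT (by name: the statement is the Claim_ definition above) =====
theorem make_conn_str_py_spec : Claim_equal_make_conn_str_py := by
  intro parts _ hpre
  unfold Spec_make_conn_str_py make_conn_str_py make_conn_str_py_alt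
  rw [show (fun (acc : List String) (parts_key : String) =>
        let parts_value := pvLookup parts parts_key
        let parts_value := if PySem.Str.isIn " " parts_value
                             then "'" ++ parts_value ++ "'" else parts_value
        acc ++ [parts_key ++ "=" ++ parts_value]) =
      (fun acc k => acc ++ [pvItem parts k]) from rfl]
  rw [PySem.List.foldl_append_singleton_eq_map]
  rw [show (fun k => pvFmtB k (pvLookup parts k)) = pvItem parts from rfl]
  rw [pv_order parts hpre]
  rfl
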